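-- pv_equiv track=rewrite | github.com/mmrahman21/my-leetcode-solutions | python solutions/prob_1814.py | checkNicePairs
-- ===== SOURCE A (Python) =====
-- def checkNicePairs(p, q):
--     main_p = p
--     main_q = q
--     p1 = 0
--     while p!=0:
--         rem = p % 10
--         p1 = p1*10 + rem
--         p //= 10
--
--     q1 = 0
--     while q!=0:
--         rem = q % 10
--         q1 = q1*10 + rem
--         q //= 10
--
--     return main_p + q1 == main_q + p1
-- ===== SOURCE B (Python) =====
-- def checkNicePairs(p, q):
--     def rev(n):
--         r = 0
--         for c in reversed(str(n)):
--             r = r * 10 + int(c)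
--         return r
--     return p + rev(q) == q + rev(p)
-- ===== Notes on version B (the rewrite author's own statement) =====
-- stated objective: idiomatic
-- what changed: Each arithmetic digit-reversal while-loop (acc = acc*10 + n%10; n //= 10) is replaced by a fold over the reversed decimal string of the number (r = r*10 + int(c) for c in reversed(str(n))): the digit sequence is obtained from str() instead of being maintained by division state.
import Mathlib
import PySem

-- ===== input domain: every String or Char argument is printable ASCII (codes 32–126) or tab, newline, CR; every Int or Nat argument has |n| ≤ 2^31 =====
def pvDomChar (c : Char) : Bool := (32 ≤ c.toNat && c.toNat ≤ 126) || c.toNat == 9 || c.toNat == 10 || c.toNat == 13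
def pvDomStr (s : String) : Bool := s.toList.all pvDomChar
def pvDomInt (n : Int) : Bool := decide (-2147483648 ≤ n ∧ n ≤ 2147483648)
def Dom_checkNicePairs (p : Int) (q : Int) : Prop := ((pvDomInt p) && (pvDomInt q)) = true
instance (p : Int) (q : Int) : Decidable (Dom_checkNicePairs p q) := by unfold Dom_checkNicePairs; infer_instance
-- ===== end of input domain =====

-- B replaces A's arithmetic digit-reversal while-loops by a fold over the reversed decimal
-- string of each number (idiomatic string reversal); equivalence is for the return value on
-- non-negative inputs (A never returns on negative inputs: its while-loop does not terminate).

-- ===== PORT A =====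
-- A's while loop `while p != 0: rem = p % 10; p1 = p1*10 + rem; p //= 10` as fueled
-- structural recursion; fuel p.natAbs + 1 is enough for every non-negative p (the digit
-- count is at most that), and the loop does not terminate for negative p (outside Pre_).
def pvRevLoopA : Nat → Int → Int → Int
  | 0, _, acc => acc
  | f + 1, p, acc =>
    if p = 0 then acc
    else pvRevLoopA f (PySem.Int.floordiv p 10) (acc * 10 + PySem.Int.mod p 10)

def checkNicePairs (p : Int) (q : Int) : Bool :=
  let main_p := p
  let main_q := q
  let p1 := pvRevLoopA (p.natAbs + 1) p 0
  let q1 := pvRevLoopA (q.natAbs + 1) q 0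
  main_p + q1 == main_q + p1

-- ===== PORT B =====
-- Source B's `for c in reversed(str(n)): r = r*10 + int(c)`.  int(c) is PySem.Int.ofChars? [c];
-- Python raises ValueError where that is none (only reachable for negative n, which Pre_
-- excludes), the port uses .getD 0 there.
def pvRevAlt (n : Int) : Int :=
  ((PySem.Int.toChars n).reverse).foldl
    (fun r c => r * 10 + (PySem.Int.ofChars? [c]).getD 0) 0

def checkNicePairs_alt (p : Int) (q : Int) : Bool :=
  p + pvRevAlt q == q + pvRevAlt p

-- ===== PRECONDITION & SPEC =====
-- Pre_ excludes negative inputs: there A's while-loop never terminates (p //= 10 stalls at -1),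
-- so A returns on exactly the inputs with 0 ≤ p and 0 ≤ q.
def Pre_checkNicePairs (p : Int) (q : Int) : Prop := 0 ≤ p ∧ 0 ≤ q
instance (p : Int) (q : Int) : Decidable (Pre_checkNicePairs p q) := by unfold Pre_checkNicePairs; infer_instance
def pvWitness_checkNicePairs : Int × Int := (12, 21)

def Spec_checkNicePairs (p : Int) (q : Int) (out : Bool) : Prop := out = checkNicePairs_alt p q
instance (p : Int) (q : Int) (out : Bool) : Decidable (Spec_checkNicePairs p q out) := by unfold Spec_checkNicePairs; infer_instance

-- ===== CLAIM (what is proved, stated in full; the proofs are below) =====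
def Claim_equal_checkNicePairs : Prop := ∀ (p : Int) (q : Int), Dom_checkNicePairs p q → Pre_checkNicePairs p q → Spec_checkNicePairs p q (checkNicePairs p q)

-- ===== LEMMAS AND PROOFS =====

-- The common reference value: fold the base-10 digits (least significant first).
def pvRevNat (n : Nat) : Int := (Nat.digits 10 n).foldl (fun r d => r * 10 + (d : Int)) 0

-- A-side: the fueled loop computes the digit fold, for any sufficient fuel.
theorem pvRevLoopA_eq (f : Nat) : ∀ (n : Nat) (acc : Int), n ≤ f →
    pvRevLoopA f (n : Int) acc = (Nat.digits 10 n).foldl (fun r d => r * 10 + (d : Int)) acc := by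
  induction f with
  | zero => intro n acc h; interval_cases n; simp [pvRevLoopA]
  | succ f ih =>
    intro n acc h
    rcases Nat.eq_zero_or_pos n with h0 | h0
    · subst h0; simp [pvRevLoopA]
    · have hne : (n : Int) ≠ 0 := by exact_mod_cast Nat.pos_iff_ne_zero.mp h0
      have hdiv : PySem.Int.floordiv (n : Int) 10 = ((n / 10 : Nat) : Int) := by
        simp only [PySem.Int.floordiv]
        rw [Int.fdiv_eq_ediv, if_pos (Or.inl (by norm_num))]
        push_cast
        omega
      have hmod : PySem.Int.mod (n : Int) 10 = ((n % 10 : Nat) : Int) := by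
        simp only [PySem.Int.mod]
        rw [Int.fmod_eq_emod, if_pos (Or.inl (by norm_num))]
        push_cast
        omega
      have hle : n / 10 ≤ f := by omega
      rw [Nat.digits_def' (by norm_num : 2 ≤ 10) h0]
      simp only [pvRevLoopA, hne, hdiv, hmod]
      exact ih (n / 10) _ hle

-- each decimal digit character parses back to its value
theorem pvDigitChar_val (d : Nat) (hd : d < 10) :
    ((PySem.Int.ofChars? [Nat.digitChar d]).getD 0 : Int) = (d : Int) := by
  interval_cases d <;> decide

-- Nat.toDigitsCore on positive n ≤ fuel produces the reversed digit characters
theorem pvToDigitsCore_eq (f : Nat) : ∀ (n : Nat) (ds : List Char), 0 < n → n ≤ f →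
    Nat.toDigitsCore 10 f n ds = ((Nat.digits 10 n).map Nat.digitChar).reverse ++ ds := by
  induction f with
  | zero => intro n ds h0 h; omega
  | succ f ih =>
    intro n ds h0 h
    rw [Nat.digits_def' (by norm_num : 2 ≤ 10) h0]
    simp only [Nat.toDigitsCore]
    rcases Nat.eq_zero_or_pos (n / 10) with hq | hq
    · simp [hq]
    · have hne : ¬ (n / 10 = 0) := by omega
      have hle : n / 10 ≤ f := by omega
      rw [if_neg hne, ih (n / 10) _ hq hle]
      simp

-- fold over the digit characters = fold over the digits
theorem pvFoldMap_eq (ds : List Nat) (hall : ∀ d ∈ ds, d < 10) : ∀ (acc : Int),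
    (ds.map Nat.digitChar).foldl (fun r c => r * 10 + (PySem.Int.ofChars? [c]).getD 0) acc
      = ds.foldl (fun r d => r * 10 + (d : Int)) acc := by
  induction ds with
  | nil => intro acc; rfl
  | cons d ds ih =>
    intro acc
    have hd : d < 10 := hall d (List.mem_cons_self ..)
    simp only [List.map_cons, List.foldl_cons, pvDigitChar_val d hd]
    exact ih (fun x hx => hall x (List.mem_cons_of_mem _ hx)) _

-- B-side: the string fold computes the same digit fold, for every non-negative n
theorem pvRevAlt_eq (n : Nat) : pvRevAlt (n : Int) = pvRevNat n := by
  have htc : PySem.Int.toChars (n : Int) = Nat.toDigits 10 n := by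
    simp [PySem.Int.toChars]
  rcases Nat.eq_zero_or_pos n with h0 | h0
  · subst h0; decide
  · have hTD : Nat.toDigits 10 n = ((Nat.digits 10 n).map Nat.digitChar).reverse ++ [] := by
      unfold Nat.toDigits
      exact pvToDigitsCore_eq (n + 1) n [] h0 (by omega)
    rw [pvRevAlt, htc, hTD]
    simp only [List.append_nil, List.reverse_reverse]
    exact pvFoldMap_eq _ (fun d hd => Nat.digits_lt_base (by norm_num) hd) 0

theorem checkNicePairs_spec : Claim_equal_checkNicePairs := by
  intro p q _ hpre
  obtain ⟨hp, hq⟩ := hpre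
  have hpn : ((p.toNat : Nat) : Int) = p := Int.toNat_of_nonneg hp
  have hqn : ((q.toNat : Nat) : Int) = q := Int.toNat_of_nonneg hq
  have hA : ∀ r : Int, 0 ≤ r →
      pvRevLoopA (r.natAbs + 1) r 0 = pvRevNat r.toNat := by
    intro r hr
    have h1 : ((r.toNat : Nat) : Int) = r := Int.toNat_of_nonneg hr
    have h2 : r.natAbs = r.toNat := by omega
    rw [← h1, pvRevNat]
    rw [show ((r.toNat : Nat) : Int).natAbs = r.toNat by omega]
    exact pvRevLoopA_eq (r.toNat + 1) r.toNat 0 (by omega)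
  have hB : ∀ r : Int, 0 ≤ r → pvRevAlt r = pvRevNat r.toNat := by
    intro r hr
    conv_lhs => rw [← Int.toNat_of_nonneg hr]
    rw [pvRevAlt_eq]
  show checkNicePairs p q = checkNicePairs_alt p q
  simp only [checkNicePairs, checkNicePairs_alt, hA p hp, hA q hq, hB p hp, hB q hq]
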